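-- pv_equiv track=rewrite | github.com/BenSparksCode/advent-of-code-2023 | 2023/Python/13.py | get_row_scores
-- ===== SOURCE A (Python) =====
-- from typing import List
--
-- def get_row_scores(grid: List[str]) -> List[int]:
--     scores = []
--     for r in grid:
--         curr_score = 0
--         for x, c in enumerate(r):
--             if c == "#": curr_score += 2 * (10 ** x)
--             else: curr_score += 1 * (10 ** x)
--         scores.append(curr_score)
--     return scores
-- ===== SOURCE B (Python) =====
-- from typing import List
--
-- def _row_score(r: str) -> int:
--     # Horner's rule over the row read right-to-left: no powers needed.
--     score = 0
--     for c in reversed(r):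
--         score = score * 10 + (2 if c == "#" else 1)
--     return score
--
-- def get_row_scores(grid: List[str]) -> List[int]:
--     return [_row_score(r) for r in grid]
-- ===== Notes on version B (the rewrite author's own statement) =====
-- stated objective: alternative
-- what changed: Replaces per-character 10**x power sums accumulated with enumerate by Horner's rule over the reversed row (score = score*10 + digit), and builds the result as a list comprehension instead of appending to an accumulator list.
import Mathlib
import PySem

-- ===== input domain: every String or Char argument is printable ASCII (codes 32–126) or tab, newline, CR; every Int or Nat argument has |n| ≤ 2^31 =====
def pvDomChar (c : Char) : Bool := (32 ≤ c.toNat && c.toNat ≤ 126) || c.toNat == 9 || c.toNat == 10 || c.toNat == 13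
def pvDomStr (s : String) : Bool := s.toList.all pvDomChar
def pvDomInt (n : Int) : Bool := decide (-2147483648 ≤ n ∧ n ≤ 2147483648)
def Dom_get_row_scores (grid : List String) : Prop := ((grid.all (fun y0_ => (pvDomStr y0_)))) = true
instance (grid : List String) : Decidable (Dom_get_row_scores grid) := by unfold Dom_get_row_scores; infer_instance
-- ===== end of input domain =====

-- B replaces A's enumerate + 10**x positional sums by Horner's rule over the reversed row; alternative, same cost.


-- ===== PORT A =====
-- inner loop: for x, c in enumerate(r): curr_score += (2 or 1) * 10 ** x
-- (enumerate indices are ≥ 0, so Python's 10 ** x is 10 ^ x.toNat)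
def get_row_scores (grid : List String) : List Int :=
  grid.foldl
    (fun scores r =>
      scores ++ [ (PySem.List.enumerate r.toList 0).foldl
        (fun curr_score p =>
          if p.2 = '#' then curr_score + 2 * (10 : Int) ^ p.1.toNat
          else curr_score + 1 * (10 : Int) ^ p.1.toNat) 0 ])
    []

-- ===== PORT B =====
-- Horner's rule over the reversed row
def rowScoreAlt (r : List Char) : Int :=
  r.reverse.foldl (fun score c => score * 10 + (if c = '#' then 2 else 1)) 0

def get_row_scores_alt (grid : List String) : List Int :=
  grid.map (fun r => rowScoreAlt r.toList)

-- ===== PRECONDITION & SPEC =====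
def Spec_get_row_scores (grid : List String) (out : List Int) : Prop := out = get_row_scores_alt grid
instance (grid : List String) (out : List Int) : Decidable (Spec_get_row_scores grid out) := by unfold Spec_get_row_scores; infer_instance

-- ===== CLAIM (what is proved, stated in full; the proofs are below) =====
def Claim_equal_get_row_scores : Prop := ∀ (grid : List String), Dom_get_row_scores grid → Spec_get_row_scores grid (get_row_scores grid)

-- ===== LEMMAS AND PROOFS =====

-- the row polynomial both loops compute: Σ digit(cᵢ) · 10^i
def rowPoly : List Char → Int
  | [] => 0
  | c :: cs => (if c = '#' then 2 else 1) + 10 * rowPoly cs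

theorem foldA_eq_rowPoly (cs : List Char) : ∀ (k : Nat) (acc : Int),
    (PySem.List.enumerate cs (k : Int)).foldl
      (fun curr_score p =>
        if p.2 = '#' then curr_score + 2 * (10 : Int) ^ p.1.toNat
        else curr_score + 1 * (10 : Int) ^ p.1.toNat) acc
      = acc + 10 ^ k * rowPoly cs := by
  induction cs with
  | nil => intro k acc; simp [PySem.List.enumerate_nil, rowPoly]
  | cons c cs ih =>
    intro k acc
    rw [PySem.List.enumerate_cons]
    have h1 : ((k : Int) + 1) = ((k + 1 : Nat) : Int) := by push_cast; ring
    simp only [List.foldl_cons, h1, ih]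
    rcases Decidable.em (c = '#') with h | h <;>
      simp [h, rowPoly, Int.toNat_natCast, pow_succ] <;> ring

theorem foldB_eq_rowPoly (cs : List Char) : ∀ (s : Int),
    cs.reverse.foldl (fun score c => score * 10 + (if c = '#' then 2 else 1)) s
      = s * 10 ^ cs.length + rowPoly cs := by
  induction cs with
  | nil => intro s; simp [rowPoly]
  | cons c cs ih =>
    intro s
    simp only [List.reverse_cons, List.foldl_append, List.foldl_cons, List.foldl_nil, ih,
      rowPoly, List.length_cons, pow_succ]
    ring

theorem row_eq (cs : List Char) :
    (PySem.List.enumerate cs 0).foldl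
      (fun curr_score p =>
        if p.2 = '#' then curr_score + 2 * (10 : Int) ^ p.1.toNat
        else curr_score + 1 * (10 : Int) ^ p.1.toNat) 0 = rowScoreAlt cs := by
  rw [rowScoreAlt, foldB_eq_rowPoly]
  simpa using foldA_eq_rowPoly cs 0 0

theorem foldl_app_map (grid : List String) : ∀ (init : List Int),
    grid.foldl
      (fun scores r =>
        scores ++ [ (PySem.List.enumerate r.toList 0).foldl
          (fun curr_score p =>
            if p.2 = '#' then curr_score + 2 * (10 : Int) ^ p.1.toNat
            else curr_score + 1 * (10 : Int) ^ p.1.toNat) 0 ])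
      init
      = init ++ grid.map (fun r => rowScoreAlt r.toList) := by
  induction grid with
  | nil => intro init; simp
  | cons r grid ih =>
    intro init
    rw [List.foldl_cons, row_eq, ih]
    simp

-- ===== VERDICT (by name: the statement is the Claim_ definition above) =====
theorem get_row_scores_spec : Claim_equal_get_row_scores := by
  intro grid _
  show get_row_scores grid = get_row_scores_alt grid
  simpa [get_row_scores, get_row_scores_alt] using foldl_app_map grid []
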